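-- pv_equiv track=rewrite | github.com/QuangChinhDE/appbi-ai | backend/app/services/auto_tagging_service.py | _format_column_catalog
-- ===== SOURCE A (Python) =====
-- from typing import Any, Dict, Iterable, List, Optional, Sequence, Set, Tuple
--
-- def _format_column_catalog(columns: Sequence[Dict[str, str]], max_line_chars: int = 160) -> str:
--     """Render the full column catalog compactly so we can keep all names."""
--     if not columns:
--         return "  (no columns available)"
--
--     entries = [f"{column['name']} ({column.get('type') or 'unknown'})" for column in columns]
--     lines: List[str] = []
--     current = "  - "
--     for entry in entries:
--         candidate = entry if current == "  - " else f", {entry}"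
--         if len(current) + len(candidate) > max_line_chars and current != "  - ":
--             lines.append(current)
--             current = f"  - {entry}"
--         else:
--             current += candidate if current != "  - " else entry
--     if current.strip():
--         lines.append(current)
--     return "\n".join(lines)
-- ===== SOURCE B (Python) =====
-- from typing import Dict, List, Sequence
--
-- def _format_column_catalog(columns: Sequence[Dict[str, str]], max_line_chars: int = 160) -> str:
--     """Render the full column catalog compactly so we can keep all names."""
--     if not columns:
--         return "  (no columns available)"
--
--     entries = ["{} ({})".format(c["name"], c.get("type") or "unknown") for c in columns]
--     n = len(entries)
--     # prefix sums of entry lengths: pref[k] = len(entries[0]) + ... + len(entries[k-1])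
--     pref = [0]
--     total = 0
--     for e in entries:
--         total += len(e)
--         pref.append(total)
--     # The line holding entries i..j has width 4 + (pref[j+1] - pref[i]) + 2*(j - i),
--     # which is strictly increasing in j, so the last entry of each line can be
--     # found by binary search instead of walking entry by entry.
--     lines: List[str] = []
--     i = 0
--     while i < n:
--         lo, hi = i, n - 1
--         while lo < hi:
--             mid = (lo + hi + 1) // 2
--             if 4 + (pref[mid + 1] - pref[i]) + 2 * (mid - i) <= max_line_chars:
--                 lo = mid
--             else:
--                 hi = mid - 1
--         # lo = largest j with that width <= max_line_chars (the first entry of a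
--         # line is always admitted, so lo = i when even a single entry overflows)
--         lines.append("  - " + ", ".join(entries[i:lo + 1]))
--         i = lo + 1
--     return "\n".join(lines)
-- ===== Notes on version B (the rewrite author's own statement) =====
-- stated objective: alternative
-- what changed: B precomputes prefix sums of entry lengths, finds the last entry of each line by binary search on the closed-form line width (strictly increasing in the end index), and emits each line as one slice join, instead of A's entry-by-entry greedy string growth.
import Mathlib
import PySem

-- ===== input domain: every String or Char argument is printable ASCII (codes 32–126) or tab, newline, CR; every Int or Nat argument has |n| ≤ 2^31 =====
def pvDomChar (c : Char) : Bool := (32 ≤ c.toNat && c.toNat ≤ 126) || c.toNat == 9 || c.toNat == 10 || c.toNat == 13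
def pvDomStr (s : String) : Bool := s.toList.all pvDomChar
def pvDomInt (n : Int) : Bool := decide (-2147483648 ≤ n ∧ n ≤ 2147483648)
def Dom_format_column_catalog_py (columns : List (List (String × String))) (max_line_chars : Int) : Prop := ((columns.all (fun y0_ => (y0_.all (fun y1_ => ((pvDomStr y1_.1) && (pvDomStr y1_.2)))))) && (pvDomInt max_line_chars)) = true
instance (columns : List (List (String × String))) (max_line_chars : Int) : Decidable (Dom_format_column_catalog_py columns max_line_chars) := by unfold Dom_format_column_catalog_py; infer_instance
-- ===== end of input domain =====

-- B precomputes prefix sums of entry lengths, finds each line's last entry by binary search on the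
-- closed-form line width, and renders each line as one slice join (alternative algorithm, not claimed faster).


-- ===== PORT A =====
-- shared by both ports: dict lookup (first match) and the entry comprehension, identical in Source A and Source B
def pvGetCol (col : List (String × String)) (k : String) : Option String :=
  (col.find? (fun p => p.1 == k)).map (·.2)

-- f"{column['name']} ({column.get('type') or 'unknown'})"  (KeyError on missing 'name' is Pre_'s to exclude)
def pvEntry (col : List (String × String)) : String :=
  let t := match pvGetCol col "type" with
    | none => "unknown"
    | some s => if s = "" then "unknown" else s
  (pvGetCol col "name").getD "" ++ " (" ++ t ++ ")"

-- one iteration of A's for-loop over (lines, current)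
def aStep (m : Int) (st : List String × String) (e : String) : List String × String :=
  let lines := st.1
  let current := st.2
  let candidate := if current = "  - " then e else ", " ++ e
  if PySem.Str.len current + PySem.Str.len candidate > m ∧ current ≠ "  - " then
    (lines ++ [current], "  - " ++ e)
  else
    (lines, current ++ (if current ≠ "  - " then candidate else e))

def format_column_catalog_py (columns : List (List (String × String))) (max_line_chars : Int) : String :=
  if columns = [] then "  (no columns available)"
  else
    let entries := columns.map pvEntry
    let st := entries.foldl (aStep max_line_chars) (([] : List String), "  - ")
    let lines := if PySem.Str.strip st.2 ≠ "" then st.1 ++ [st.2] else st.1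
    PySem.Str.join "\n" lines

-- ===== PORT B =====
-- B's inner while-loop: binary search for the largest j in [lo, hi] whose line width
-- 4 + (pref[j+1] - pref[i]) + 2*(j - i) is ≤ m.  Indices are in range, so getD _ 0 is exact;
-- fuel (= the initial hi - lo, which bounds the iteration count) only makes the loop total.
def bSearch (pref : List Int) (m : Int) (i : Nat) : Nat → Nat → Nat → Nat
  | 0, lo, _ => lo
  | fuel + 1, lo, hi =>
    if lo < hi then
      if 4 + (pref.getD ((lo + hi + 1) / 2 + 1) 0 - pref.getD i 0)
          + 2 * ((((lo + hi + 1) / 2 : Nat) : Int) - (i : Int)) ≤ m then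
        bSearch pref m i fuel ((lo + hi + 1) / 2) hi
      else
        bSearch pref m i fuel lo ((lo + hi + 1) / 2 - 1)
    else lo

-- B's outer while-loop: one complete line per iteration, emitted as a slice join
-- (fuel = n bounds the iteration count and only makes the loop total)
def bLoop (pref : List Int) (es : List String) (m : Int) (n : Nat) : Nat → Nat → List String → List String
  | 0, _, lines => lines
  | fuel + 1, i, lines =>
    if i < n then
      bLoop pref es m n fuel (bSearch pref m i ((n - 1) - i) i (n - 1) + 1)
        (lines ++ ["  - " ++ PySem.Str.join ", "
          (PySem.List.slice es (some (i : Int)) (some ((bSearch pref m i ((n - 1) - i) i (n - 1) + 1 : Nat) : Int)))])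
    else lines

def format_column_catalog_py_alt (columns : List (List (String × String))) (max_line_chars : Int) : String :=
  if columns = [] then "  (no columns available)"
  else
    let entries := columns.map pvEntry
    let n := entries.length
    let pref := (entries.foldl
      (fun (st : List Int × Int) e => (st.1 ++ [st.2 + PySem.Str.len e], st.2 + PySem.Str.len e))
      ([(0 : Int)], (0 : Int))).1
    PySem.Str.join "\n" (bLoop pref entries max_line_chars n n 0 [])

-- ===== PRECONDITION & SPEC =====
-- A raises KeyError on column['name'] when a column lacks the key "name"; Pre_ excludes exactly those inputs.
def Pre_format_column_catalog_py (columns : List (List (String × String))) (max_line_chars : Int) : Prop :=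
  ∀ col ∈ columns, col.any (fun p => p.1 == "name") = true
instance (columns : List (List (String × String))) (max_line_chars : Int) : Decidable (Pre_format_column_catalog_py columns max_line_chars) := by unfold Pre_format_column_catalog_py; infer_instance

def pvWitness_format_column_catalog_py : (List (List (String × String))) × Int :=
  ([[("name", "a"), ("type", "int")], [("name", "b")]], 20)

def Spec_format_column_catalog_py (columns : List (List (String × String))) (max_line_chars : Int) (out : String) : Prop := out = format_column_catalog_py_alt columns max_line_chars
instance (columns : List (List (String × String))) (max_line_chars : Int) (out : String) : Decidable (Spec_format_column_catalog_py columns max_line_chars out) := by unfold Spec_format_column_catalog_py; infer_instance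

-- ===== CLAIM (what is proved, stated in full; the proofs are below) =====
def Claim_equal_format_column_catalog_py : Prop := ∀ (columns : List (List (String × String))) (max_line_chars : Int), Dom_format_column_catalog_py columns max_line_chars → Pre_format_column_catalog_py columns max_line_chars → Spec_format_column_catalog_py columns max_line_chars (format_column_catalog_py columns max_line_chars)

-- ===== LEMMAS AND PROOFS =====

-- proof-side model of a single greedy step over (groups, group, length)
def bStep (m : Int) (st : List (List String) × List String × Int) (e : String) :
    List (List String) × List String × Int :=
  let groups := st.1
  let group := st.2.1
  let length := st.2.2
  let cost := if group = [] then PySem.Str.len e else 2 + PySem.Str.len e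
  if group ≠ [] ∧ length + cost > m then
    (groups ++ [group], [e], 4 + PySem.Str.len e)
  else
    (groups, group ++ [e], length + cost)

-- "  - " + ", ".join(g)
def bRender (g : List String) : String := "  - " ++ PySem.Str.join ", " g

-- the greedy grouping as a recursive function (the common spec both ports meet)
def grpFrom (m : Int) (g : List String) (acc : Int) : List String → List (List String)
  | [] => [g]
  | e :: rest =>
    if acc + (2 + PySem.Str.len e) > m then
      g :: grpFrom m [e] (4 + PySem.Str.len e) rest
    else
      grpFrom m (g ++ [e]) (acc + (2 + PySem.Str.len e)) rest

-- how many further entries the current line still absorbs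
def takeCount (m : Int) (acc : Int) : List String → Nat
  | [] => 0
  | e :: rest =>
    if acc + (2 + PySem.Str.len e) > m then 0
    else 1 + takeCount m (acc + (2 + PySem.Str.len e)) rest

-- partial sums produced by B's pref-building loop
def psums (t : Int) : List String → List Int
  | [] => []
  | e :: r => (t + PySem.Str.len e) :: psums (t + PySem.Str.len e) r

-- prefix sum of entry lengths and the closed-form width of the line holding entries i..j
def pvS (es : List String) (k : Nat) : Int := ((es.take k).map PySem.Str.len).sum
def pvW (es : List String) (i j : Nat) : Int :=
  4 + (pvS es (j + 1) - pvS es i) + 2 * ((j : Int) - (i : Int))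

-- ---------- A-side lemmas (fold over aStep = fold over bStep, rendered) ----------

-- an entry string is never empty (it ends in ")")
theorem pvEntry_ne_empty (col : List (String × String)) : pvEntry col ≠ "" := by
  unfold pvEntry
  intro h
  have := congrArg String.toList h
  simp at this

-- ", ".join over a snoc, g nonempty
theorem join_snoc (gs : List (List Char)) (e : List Char) (h : gs ≠ []) :
    PySem.Chars.join [',', ' '] (gs ++ [e]) = PySem.Chars.join [',', ' '] gs ++ [',', ' '] ++ e := by
  induction gs with
  | nil => exact absurd rfl h
  | cons x rest ih =>
    cases rest with
    | nil => simp [PySem.Chars.join_cons_cons, PySem.Chars.join_singleton]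
    | cons y t =>
      have h2 : (y :: t : List (List Char)) ≠ [] := by simp
      have ih2 := ih h2
      simp only [List.cons_append] at ih2 ⊢
      rw [PySem.Chars.join_cons_cons, ih2, PySem.Chars.join_cons_cons]
      simp

theorem bRender_singleton (e : String) : bRender [e] = "  - " ++ e := by
  apply String.toList_inj.mp
  simp [bRender, PySem.Str.join, PySem.Chars.join_singleton]

theorem bRender_snoc (g : List String) (e : String) (h : g ≠ []) :
    bRender (g ++ [e]) = bRender g ++ (", " ++ e) := by
  apply String.toList_inj.mp
  have hm : (g.map String.toList) ≠ [] := by simpa using h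
  simp only [bRender, String.toList_append, PySem.Str.toList_join, List.map_append, List.map_cons,
    List.map_nil]
  rw [show (", " : String).toList = [',', ' '] from rfl, join_snoc _ _ hm]
  simp

theorem len_bRender_singleton (e : String) : PySem.Str.len (bRender [e]) = 4 + PySem.Str.len e := by
  rw [bRender_singleton]
  simp [PySem.Str.len]
  omega

theorem len_bRender_snoc (g : List String) (e : String) (h : g ≠ []) :
    PySem.Str.len (bRender (g ++ [e])) = PySem.Str.len (bRender g) + (2 + PySem.Str.len e) := by
  rw [bRender_snoc g e h]
  simp [PySem.Str.len]
  omega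

-- the join of a nonempty group of nonempty entries is nonempty
theorem join_ne_nil (g : List String) (hne : g ≠ []) (hel : ∀ x ∈ g, x ≠ "") :
    PySem.Chars.join [',', ' '] (g.map String.toList) ≠ [] := by
  cases g with
  | nil => exact absurd rfl hne
  | cons x rest =>
    cases rest with
    | nil =>
      simp only [List.map_cons, List.map_nil, PySem.Chars.join_singleton]
      have hx : x ≠ "" := hel x (by simp)
      intro hnil
      exact hx (String.toList_inj.mp (by rw [hnil]; rfl))
    | cons y t =>
      simp [PySem.Chars.join_cons_cons]

theorem bRender_ne_dash (g : List String) (hne : g ≠ []) (hel : ∀ x ∈ g, x ≠ "") :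
    bRender g ≠ "  - " := by
  intro h
  have := congrArg String.toList h
  simp only [bRender, String.toList_append, PySem.Str.toList_join] at this
  rw [show (", " : String).toList = [',', ' '] from rfl] at this
  have h4 : ("  - " : String).toList = ("  - " : String).toList ++ [] := by simp
  rw [h4] at this
  have := List.append_inj_right this rfl
  exact join_ne_nil g hne hel (by simpa using this)

-- stripping a rendered line never yields "" (it contains '-')
theorem strip_bRender_ne (g : List String) : PySem.Str.strip (bRender g) ≠ "" := by
  intro h
  have h1 : (PySem.Str.strip (bRender g)).toList = [] := by rw [h]; rfl
  rw [PySem.Str.toList_strip] at h1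
  have hmem : '-' ∈ (bRender g).toList := by
    rw [bRender, String.toList_append]
    exact List.mem_append_left _ (by decide)
  unfold PySem.Chars.strip PySem.Chars.rstrip PySem.Chars.lstrip at h1
  have h2 := List.reverse_eq_nil_iff.mp h1
  rw [List.dropWhile_eq_nil_iff] at h2
  have hmeml : '-' ∈ List.dropWhile PySem.Chars.isspace (bRender g).toList := by
    rcases (List.mem_append.mp (by
      rw [List.takeWhile_append_dropWhile]; exact hmem :
        '-' ∈ List.takeWhile PySem.Chars.isspace (bRender g).toList ++
          List.dropWhile PySem.Chars.isspace (bRender g).toList)) with hl | hr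
    · exact absurd (List.mem_takeWhile_imp hl) (by decide)
    · exact hr
  have := h2 '-' (by simpa using hmeml)
  exact absurd this (by decide)

-- the loop invariant: A's (lines, current) is the (groups, group) model rendered, and the
-- model's length counter is exactly len(current)
theorem loop_eq (m : Int) (es : List String) :
    ∀ (groups : List (List String)) (g : List String), g ≠ [] → (∀ x ∈ g, x ≠ "") →
    (∀ x ∈ es, x ≠ "") →
    es.foldl (aStep m) (groups.map bRender, bRender g)
      = ((es.foldl (bStep m) (groups, g, PySem.Str.len (bRender g))).1.map bRender,
         bRender (es.foldl (bStep m) (groups, g, PySem.Str.len (bRender g))).2.1) := by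
  induction es with
  | nil => intro groups g _ _ _; simp
  | cons e rest ih =>
    intro groups g hg hel hes
    have hcur : bRender g ≠ "  - " := bRender_ne_dash g hg hel
    have hene : e ≠ "" := hes e (by simp)
    have hrest : ∀ x ∈ rest, x ≠ "" := fun x hx => hes x (by simp [hx])
    simp only [List.foldl_cons]
    by_cases hcond : PySem.Str.len (bRender g) + (2 + PySem.Str.len e) > m
    · have hA : aStep m (groups.map bRender, bRender g) e
          = ((groups.map bRender) ++ [bRender g], "  - " ++ e) := by
        simp only [aStep, if_neg hcur]
        rw [if_pos]
        constructor
        · have : PySem.Str.len (", " ++ e) = 2 + PySem.Str.len e := by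
            simp [PySem.Str.len]; omega
          rw [this]; exact hcond
        · exact hcur
      have hB : bStep m (groups, g, PySem.Str.len (bRender g)) e
          = (groups ++ [g], [e], 4 + PySem.Str.len e) := by
        simp only [bStep, if_neg hg]
        rw [if_pos ⟨hg, by simpa [if_neg hg] using hcond⟩]
      rw [hA, hB]
      have := ih (groups ++ [g]) [e] (by simp) (by simpa using hene) hrest
      rw [← len_bRender_singleton e, ← bRender_singleton e] at *
      simpa [List.map_append] using this
    · have hA : aStep m (groups.map bRender, bRender g) e
          = (groups.map bRender, bRender g ++ (", " ++ e)) := by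
        simp only [aStep, if_neg hcur]
        rw [if_neg, if_pos hcur]
        intro hc
        apply hcond
        have : PySem.Str.len (", " ++ e) = 2 + PySem.Str.len e := by
          simp [PySem.Str.len]; omega
        rw [this] at hc
        exact hc.1
      have hB : bStep m (groups, g, PySem.Str.len (bRender g)) e
          = (groups, g ++ [e], PySem.Str.len (bRender g) + (2 + PySem.Str.len e)) := by
        simp only [bStep, if_neg hg]
        rw [if_neg]
        rintro ⟨-, hgt⟩
        exact hcond (by simpa [if_neg hg] using hgt)
      rw [hA, hB, ← bRender_snoc g e hg, ← len_bRender_snoc g e hg]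
      exact ih groups (g ++ [e]) (by simp) (by
        intro x hx
        rcases List.mem_append.mp hx with h | h
        · exact hel x h
        · simpa using fun hxe => hene (by simpa [hxe] using h)) hrest

-- ---------- the bStep fold computes grpFrom ----------
theorem fold_grpFrom (m : Int) (es : List String) :
    ∀ (groups : List (List String)) (g : List String) (acc : Int), g ≠ [] →
    (es.foldl (bStep m) (groups, g, acc)).1 ++ [(es.foldl (bStep m) (groups, g, acc)).2.1]
      = groups ++ grpFrom m g acc es := by
  induction es with
  | nil => intro groups g acc _; simp [grpFrom]
  | cons e rest ih =>
    intro groups g acc hg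
    simp only [List.foldl_cons, grpFrom]
    by_cases hcut : acc + (2 + PySem.Str.len e) > m
    · rw [if_pos hcut]
      have hB : bStep m (groups, g, acc) e = (groups ++ [g], [e], 4 + PySem.Str.len e) := by
        simp only [bStep, if_neg hg]
        rw [if_pos ⟨hg, by simpa [if_neg hg] using hcut⟩]
      rw [hB, ih (groups ++ [g]) [e] _ (by simp)]
      simp
    · rw [if_neg hcut]
      have hB : bStep m (groups, g, acc) e = (groups, g ++ [e], acc + (2 + PySem.Str.len e)) := by
        simp only [bStep, if_neg hg]
        rw [if_neg]
        rintro ⟨-, hgt⟩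
        exact hcut (by simpa [if_neg hg] using hgt)
      rw [hB]
      exact ih groups (g ++ [e]) _ (by simp)

-- ---------- grpFrom, characterised through takeCount ----------
theorem takeCount_le (m : Int) (es : List String) : ∀ acc, takeCount m acc es ≤ es.length := by
  induction es with
  | nil => intro acc; simp [takeCount]
  | cons e rest ih =>
    intro acc
    simp only [takeCount, List.length_cons]
    split
    · omega
    · have := ih (acc + (2 + PySem.Str.len e)); omega

theorem grpFrom_all (m : Int) (es : List String) :
    ∀ g acc, takeCount m acc es = es.length → grpFrom m g acc es = [g ++ es] := by
  induction es with
  | nil => intro g acc _; simp [grpFrom]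
  | cons e rest ih =>
    intro g acc ht
    simp only [takeCount, List.length_cons] at ht
    by_cases hcut : acc + (2 + PySem.Str.len e) > m
    · rw [if_pos hcut] at ht; omega
    · rw [if_neg hcut] at ht
      simp only [grpFrom, if_neg hcut]
      rw [ih (g ++ [e]) _ (by omega)]
      simp

theorem grpFrom_split (m : Int) (es : List String) :
    ∀ g acc, takeCount m acc es < es.length →
    grpFrom m g acc es
      = (g ++ es.take (takeCount m acc es)) ::
        grpFrom m [es.getD (takeCount m acc es) ""]
          (4 + PySem.Str.len (es.getD (takeCount m acc es) ""))
          (es.drop (takeCount m acc es + 1)) := by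
  induction es with
  | nil => intro g acc h; simp at h
  | cons e rest ih =>
    intro g acc h
    by_cases hcut : acc + (2 + PySem.Str.len e) > m
    · simp only [takeCount, if_pos hcut] at h ⊢
      simp only [grpFrom, if_pos hcut]
      simp
    · simp only [takeCount, if_neg hcut, List.length_cons] at h ⊢
      simp only [grpFrom, if_neg hcut]
      have h' : takeCount m (acc + (2 + PySem.Str.len e)) rest < rest.length := by omega
      rw [ih (g ++ [e]) _ h']
      rw [Nat.add_comm 1 (takeCount m (acc + (2 + PySem.Str.len e)) rest)]
      simp [List.take_succ_cons]

theorem takeCount_spec (m : Int) (es : List String) :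
    ∀ acc,
      (1 ≤ takeCount m acc es →
        acc + (((es.take (takeCount m acc es)).map (fun e => 2 + PySem.Str.len e)).sum) ≤ m) ∧
      (takeCount m acc es < es.length →
        acc + (((es.take (takeCount m acc es + 1)).map (fun e => 2 + PySem.Str.len e)).sum) > m) := by
  induction es with
  | nil => intro acc; simp [takeCount]
  | cons e rest ih =>
    intro acc
    by_cases hcut : acc + (2 + PySem.Str.len e) > m
    · simp only [takeCount, if_pos hcut, List.length_cons]
      constructor
      · omega
      · intro _
        simp only [List.take_succ_cons, List.take_zero, List.map_cons, List.map_nil,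
          List.sum_cons, List.sum_nil]
        omega
    · simp only [takeCount, if_neg hcut, List.length_cons]
      have ih' := ih (acc + (2 + PySem.Str.len e))
      constructor
      · intro _
        rw [Nat.add_comm 1 _, List.take_succ_cons]
        simp only [List.map_cons, List.sum_cons]
        by_cases h0 : takeCount m (acc + (2 + PySem.Str.len e)) rest = 0
        · rw [h0]
          simp only [List.take_zero, List.map_nil, List.sum_nil]
          omega
        · have := ih'.1 (by omega); omega
      · intro hlt
        rw [Nat.add_comm 1 _, Nat.add_assoc, List.take_succ_cons]
        simp only [List.map_cons, List.sum_cons]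
        have := ih'.2 (by omega)
        omega

-- ---------- B's pref list holds the prefix sums ----------
theorem fold_psums (es : List String) :
    ∀ (p : List Int) (t : Int),
      es.foldl (fun (st : List Int × Int) e =>
        (st.1 ++ [st.2 + PySem.Str.len e], st.2 + PySem.Str.len e)) (p, t)
      = (p ++ psums t es, t + (es.map PySem.Str.len).sum) := by
  induction es with
  | nil => intro p t; simp [psums]
  | cons e rest ih =>
    intro p t
    simp only [List.foldl_cons]
    rw [ih]
    simp [psums, add_assoc]

theorem psums_getD (es : List String) :
    ∀ (t : Int) (k : Nat), k < es.length →
      (psums t es).getD k 0 = t + ((es.take (k + 1)).map PySem.Str.len).sum := by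
  induction es with
  | nil => intro t k h; simp at h
  | cons e rest ih =>
    intro t k h
    cases k with
    | zero => simp [psums]
    | succ k' =>
      simp only [psums, List.getD_cons_succ]
      rw [ih _ k' (by simpa using h)]
      simp [List.take_succ_cons, add_assoc]

theorem pref_getD (es : List String) (k : Nat) (h : k ≤ es.length) :
    (((0 : Int) :: psums 0 es)).getD k 0 = pvS es k := by
  cases k with
  | zero => simp [pvS]
  | succ k' =>
    simp only [List.getD_cons_succ]
    rw [psums_getD es 0 k' (by omega)]
    simp [pvS]

-- ---------- prefix-sum arithmetic ----------
theorem pvS_take_drop (es : List String) (a s : Nat) :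
    pvS es (a + s) = pvS es a + (((es.drop a).take s).map PySem.Str.len).sum := by
  unfold pvS
  rw [List.take_add]
  simp

theorem pvS_mono (es : List String) {k k' : Nat} (h : k ≤ k') : pvS es k ≤ pvS es k' := by
  obtain ⟨d, rfl⟩ := Nat.le.dest h
  rw [pvS_take_drop]
  have hnn : 0 ≤ (((es.drop k).take d).map PySem.Str.len).sum := by
    apply List.sum_nonneg
    intro x hx
    rcases List.mem_map.mp hx with ⟨s, -, rfl⟩
    simp [PySem.Str.len_eq]
  omega

theorem pvS_succ (es : List String) (i : Nat) (h : i < es.length) :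
    pvS es (i + 1) = pvS es i + PySem.Str.len (es.getD i "") := by
  rw [pvS_take_drop es i 1, List.drop_eq_getElem_cons h, List.getD_eq_getElem es "" h]
  have h1 : (es[i] :: es.drop (i + 1)).take 1 = [es[i]] := rfl
  rw [h1]
  simp

theorem pvW_mono (es : List String) (i : Nat) {j j' : Nat} (h : j ≤ j') :
    pvW es i j ≤ pvW es i j' := by
  have := pvS_mono es (Nat.add_le_add_right h 1)
  unfold pvW
  have hc : (j : Int) ≤ (j' : Int) := by exact_mod_cast h
  omega

theorem acc_eq_pvW (es : List String) (i s : Nat) (hi : i < es.length)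
    (hs : s ≤ es.length - (i + 1)) :
    4 + PySem.Str.len (es.getD i "")
      + ((((es.drop (i + 1)).take s).map (fun e => 2 + PySem.Str.len e)).sum)
      = pvW es i (i + s) := by
  rw [PySem.List.sum_map_add_int]
  have hlen : (((es.drop (i + 1)).take s).map (fun _ => (2 : Int))).sum = 2 * (s : Int) := by
    rw [PySem.List.sum_map_const_int]
    have : ((es.drop (i + 1)).take s).length = s := by
      simp only [List.length_take, List.length_drop]
      omega
    rw [this]
    ring
  rw [hlen]
  have h1 := pvS_take_drop es (i + 1) s
  have h2 := pvS_succ es i hi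
  unfold pvW
  have h3 : pvS es (i + s + 1) = pvS es (i + 1 + s) := by
    rw [show i + s + 1 = i + 1 + s by omega]
  push_cast
  omega

-- ---------- the greedy end of a line, as binary search finds it ----------
theorem target_posts (es : List String) (m : Int) (i : Nat) (hi : i < es.length) :
    i + takeCount m (4 + PySem.Str.len (es.getD i "")) (es.drop (i + 1)) ≤ es.length - 1 ∧
    (i + takeCount m (4 + PySem.Str.len (es.getD i "")) (es.drop (i + 1)) = i ∨
      pvW es i (i + takeCount m (4 + PySem.Str.len (es.getD i "")) (es.drop (i + 1))) ≤ m) ∧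
    (∀ j, i + takeCount m (4 + PySem.Str.len (es.getD i "")) (es.drop (i + 1)) < j →
      j ≤ es.length - 1 → ¬ pvW es i j ≤ m) := by
  have hrl : (es.drop (i + 1)).length = es.length - (i + 1) := by simp
  have htle := takeCount_le m (es.drop (i + 1)) (4 + PySem.Str.len (es.getD i ""))
  have hspec := takeCount_spec m (es.drop (i + 1)) (4 + PySem.Str.len (es.getD i ""))
  refine ⟨by omega, ?_, ?_⟩
  · by_cases h0 : takeCount m (4 + PySem.Str.len (es.getD i "")) (es.drop (i + 1)) = 0
    · left; omega
    · right
      have hs1 := hspec.1 (by omega)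
      have hb := acc_eq_pvW es i (takeCount m (4 + PySem.Str.len (es.getD i "")) (es.drop (i + 1))) hi (by omega)
      omega
  · intro j hj hjle
    have hlt : takeCount m (4 + PySem.Str.len (es.getD i "")) (es.drop (i + 1)) < (es.drop (i + 1)).length := by omega
    have hs2 := hspec.2 hlt
    have hb := acc_eq_pvW es i (takeCount m (4 + PySem.Str.len (es.getD i "")) (es.drop (i + 1)) + 1) hi (by omega)
    have hmono : pvW es i (i + (takeCount m (4 + PySem.Str.len (es.getD i "")) (es.drop (i + 1)) + 1)) ≤ pvW es i j := pvW_mono es i (by omega)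
    intro hle
    omega

theorem bSearch_post (es : List String) (m : Int) (i : Nat) (hn : i < es.length) :
    ∀ (fuel lo hi : Nat), hi - lo ≤ fuel → i ≤ lo → lo ≤ hi → hi ≤ es.length - 1 →
    (lo = i ∨ pvW es i lo ≤ m) →
    (∀ j, hi < j → j ≤ es.length - 1 → ¬ pvW es i j ≤ m) →
    i ≤ bSearch ((0 : Int) :: psums 0 es) m i fuel lo hi ∧
    bSearch ((0 : Int) :: psums 0 es) m i fuel lo hi ≤ es.length - 1 ∧
    (bSearch ((0 : Int) :: psums 0 es) m i fuel lo hi = i ∨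
      pvW es i (bSearch ((0 : Int) :: psums 0 es) m i fuel lo hi) ≤ m) ∧
    (∀ j, bSearch ((0 : Int) :: psums 0 es) m i fuel lo hi < j → j ≤ es.length - 1 →
      ¬ pvW es i j ≤ m) := by
  intro fuel
  induction fuel with
  | zero =>
    intro lo hi hf h1 h2 h3 h4 h5
    simp only [bSearch]
    exact ⟨h1, by omega, h4, fun j hj hjle => h5 j (by omega) hjle⟩
  | succ fuel ih =>
    intro lo hi hf h1 h2 h3 h4 h5
    simp only [bSearch]
    split
    · next hlt =>
      have hmid1 : lo < (lo + hi + 1) / 2 := by omega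
      have hmid2 : (lo + hi + 1) / 2 ≤ hi := by omega
      have hcond : (4 + ((((0 : Int) :: psums 0 es)).getD ((lo + hi + 1) / 2 + 1) 0
            - (((0 : Int) :: psums 0 es)).getD i 0)
            + 2 * ((((lo + hi + 1) / 2 : Nat) : Int) - (i : Int)) ≤ m)
          ↔ pvW es i ((lo + hi + 1) / 2) ≤ m := by
        rw [pref_getD es ((lo + hi + 1) / 2 + 1) (by omega), pref_getD es i (by omega)]
        unfold pvW
        exact Iff.rfl
      split
      · next hyes =>
        exact ih ((lo + hi + 1) / 2) hi (by omega) (by omega) hmid2 h3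
          (Or.inr (hcond.mp hyes)) h5
      · next hno =>
        refine ih lo ((lo + hi + 1) / 2 - 1) (by omega) h1 (by omega) (by omega) h4 ?_
        intro j hj hjle hle
        have hmono : pvW es i ((lo + hi + 1) / 2) ≤ pvW es i j := pvW_mono es i (by omega)
        exact hno (hcond.mpr (by omega))
    · next hge =>
      exact ⟨h1, by omega, h4, fun j hj hjle => h5 j (by omega) hjle⟩

theorem greedy_unique (es : List String) (m : Int) (i r r' : Nat)
    (ha1 : i ≤ r) (ha2 : r ≤ es.length - 1)
    (ha3 : r = i ∨ pvW es i r ≤ m)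
    (ha4 : ∀ j, r < j → j ≤ es.length - 1 → ¬ pvW es i j ≤ m)
    (hb1 : i ≤ r') (hb2 : r' ≤ es.length - 1)
    (hb3 : r' = i ∨ pvW es i r' ≤ m)
    (hb4 : ∀ j, r' < j → j ≤ es.length - 1 → ¬ pvW es i j ≤ m) : r = r' := by
  by_contra hne
  rcases Nat.lt_or_ge r r' with h | h
  · have hc := ha4 r' h hb2
    rcases hb3 with rfl | hw
    · omega
    · exact hc hw
  · have hlt : r' < r := by omega
    have hc := hb4 r hlt ha2
    rcases ha3 with rfl | hw
    · omega
    · exact hc hw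

theorem bSearch_eq (es : List String) (m : Int) (i : Nat) (hi : i < es.length) :
    bSearch ((0 : Int) :: psums 0 es) m i ((es.length - 1) - i) i (es.length - 1)
      = i + takeCount m (4 + PySem.Str.len (es.getD i "")) (es.drop (i + 1)) := by
  have hpost := bSearch_post es m i hi ((es.length - 1) - i) i (es.length - 1) (by omega)
    (Nat.le_refl i) (by omega) (Nat.le_refl _) (Or.inl rfl)
    (by intro j hj hjle hle; omega)
  have htgt := target_posts es m i hi
  exact greedy_unique es m i _ _ hpost.1 hpost.2.1 hpost.2.2.1 hpost.2.2.2
    (by omega) htgt.1 htgt.2.1 htgt.2.2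

-- (l.drop a).getD b = l.getD (a+b) for in-range indices
theorem getD_drop_eq (l : List String) (a b : Nat) (h : a + b < l.length) :
    (l.drop a).getD b "" = l.getD (a + b) "" := by
  rw [List.getD_eq_getElem _ _ (by simp only [List.length_drop]; omega),
      List.getD_eq_getElem _ _ h]
  simp [List.getElem_drop]

-- ---------- B's outer loop renders grpFrom ----------
theorem bLoop_stop (pref : List Int) (es : List String) (m : Int) (n : Nat)
    (fuel i : Nat) (lines : List String) (h : ¬ i < n) :
    bLoop pref es m n fuel i lines = lines := by
  cases fuel with
  | zero => rfl
  | succ f => simp [bLoop, h]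

theorem bLoop_eq (es : List String) (m : Int) :
    ∀ (fuel i : Nat) (lines : List String), i < es.length → es.length - i ≤ fuel →
    bLoop ((0 : Int) :: psums 0 es) es m es.length fuel i lines
      = lines ++ (grpFrom m [es.getD i ""] (4 + PySem.Str.len (es.getD i ""))
          (es.drop (i + 1))).map bRender := by
  intro fuel
  induction fuel with
  | zero => intro i lines hi hf; omega
  | succ fuel ih =>
    intro i lines hi hf
    simp only [bLoop]
    rw [if_pos hi]
    rw [bSearch_eq es m i hi]
    set acc := 4 + PySem.Str.len (es.getD i "") with hacc
    set t := takeCount m acc (es.drop (i + 1)) with htdef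
    have htle : t ≤ (es.drop (i + 1)).length := takeCount_le m _ acc
    have hrl : (es.drop (i + 1)).length = es.length - (i + 1) := by simp
    have hslice : PySem.List.slice es (some (i : Int)) (some ((i + t + 1 : Nat) : Int))
        = es.getD i "" :: (es.drop (i + 1)).take t := by
      rw [PySem.List.slice_natCast]
      rw [show i + t + 1 - i = t + 1 by omega]
      rw [List.drop_eq_getElem_cons hi, List.take_succ_cons,
          List.getD_eq_getElem es "" hi]
    by_cases hlast : t < (es.drop (i + 1)).length
    · have hnext : i + t + 1 < es.length := by omega
      rw [grpFrom_split m (es.drop (i + 1)) [es.getD i ""] acc (htdef ▸ hlast)]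
      rw [← htdef]
      have hg1 : (es.drop (i + 1)).getD t "" = es.getD (i + t + 1) "" := by
        rw [getD_drop_eq es (i + 1) t (by omega)]
        rw [show i + 1 + t = i + t + 1 by omega]
      have hg2 : (es.drop (i + 1)).drop (t + 1) = es.drop (i + t + 1 + 1) := by
        rw [List.drop_drop]
        rw [show i + 1 + (t + 1) = i + t + 1 + 1 by omega]
      rw [hg1, hg2, hslice]
      rw [ih (i + t + 1) _ hnext (by omega)]
      simp [bRender, List.append_assoc]
    · have ht : t = (es.drop (i + 1)).length := by omega
      have hstop : ¬ (i + t + 1 < es.length) := by omega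
      rw [bLoop_stop _ _ _ _ fuel (i + t + 1) _ hstop]
      rw [grpFrom_all m _ _ _ (htdef ▸ ht)]
      rw [hslice]
      have : (es.drop (i + 1)).take t = es.drop (i + 1) := by
        rw [ht]; exact List.take_length
      rw [this]
      simp [bRender]

-- ===== VERDICT (by name: the statement is the Claim_ definition above) =====
theorem format_column_catalog_py_spec : Claim_equal_format_column_catalog_py := by
  intro columns m _ _
  unfold Spec_format_column_catalog_py format_column_catalog_py format_column_catalog_py_alt
  cases columns with
  | nil => simp
  | cons c cs =>
    simp only [reduceCtorEq, if_false]
    have hene : pvEntry c ≠ "" := pvEntry_ne_empty c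
    set es := (c :: cs).map pvEntry with hes0
    have hesc : es = pvEntry c :: cs.map pvEntry := by simp [hes0]
    -- A side: peel the first iteration, then apply the loop invariant
    have hA1 : es.foldl (aStep m) ([], "  - ")
        = (cs.map pvEntry).foldl (aStep m) ([], "  - " ++ pvEntry c) := by
      rw [hesc, List.foldl_cons]
      congr 1
      simp [aStep]
    have hnn : ∀ x ∈ cs.map pvEntry, x ≠ "" := by
      intro x hx
      rcases List.mem_map.mp hx with ⟨col, -, rfl⟩
      exact pvEntry_ne_empty col
    have hloop := loop_eq m (cs.map pvEntry) [] [pvEntry c] (by simp)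
      (by simpa using hene) hnn
    simp only [List.map_nil] at hloop
    rw [hA1, ← bRender_singleton, hloop, if_pos (strip_bRender_ne _)]
    -- A's groups are grpFrom
    have hgr := fold_grpFrom m (cs.map pvEntry) [] [pvEntry c]
      (PySem.Str.len (bRender [pvEntry c])) (by simp)
    -- B side: the pref fold builds the prefix sums, then bLoop renders grpFrom
    have hpref := fold_psums es [(0 : Int)] 0
    rw [hpref]
    have hbl := bLoop_eq es m es.length 0 [] (by rw [hesc]; simp) (by omega)
    simp only [List.singleton_append] at hbl ⊢
    rw [hbl]
    rw [hesc]
    simp only [List.getD_cons_zero, List.drop_succ_cons, List.drop_zero, List.nil_append]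
    rw [len_bRender_singleton] at hgr
    rw [len_bRender_singleton]
    simp only [List.nil_append] at hgr
    rw [← hgr]
    simp [List.map_append]
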